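-- pv_equiv track=rewrite | github.com/captncasper/legalai-pro-au | real_revolutionary_ai.py | _identify_compliance_issues
-- ===== SOURCE A (Python) =====
-- from typing import List, Dict, Any, Optional, Tuple
--
-- def _identify_compliance_issues(risks: List[Dict]) -> List[str]:
--     """Identify real compliance issues"""
--     compliance_issues = []
--
--     for risk in risks:
--         if 'consumer guarantees' in risk['legal_reference'].lower():
--             compliance_issues.append("Australian Consumer Law compliance - consumer guarantees cannot be excluded")
--
--         if 'unfair contract terms' in risk['legal_reference'].lower():
--             compliance_issues.append("Unfair Contract Terms provisions may void certain clauses")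
--
--         if 'moral rights' in risk['legal_reference'].lower():
--             compliance_issues.append("Copyright Act compliance - moral rights cannot be assigned")
--
--     return list(set(compliance_issues))  # Remove duplicates
-- ===== SOURCE B (Python) =====
-- _RULES = [
--     ("consumer guarantees", "Australian Consumer Law compliance - consumer guarantees cannot be excluded"),
--     ("unfair contract terms", "Unfair Contract Terms provisions may void certain clauses"),
--     ("moral rights", "Copyright Act compliance - moral rights cannot be assigned"),
-- ]
--
-- def _identify_compliance_issues(risks):
--     """Identify real compliance issues.
--
--     Stage the lowered references, then recursively partition a SHRINKING rule
--     list against each reference: a rule that fires is emitted once and removed,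
--     so duplicates never arise and no dedup pass exists; recursion stops as soon
--     as either the references or the remaining rules run out.
--     """
--     refs = [risk['legal_reference'].lower() for risk in risks]
--
--     def go(refs, rules):
--         if not refs or not rules:
--             return []
--         ref, rest = refs[0], refs[1:]
--         hit = [rule for rule in rules if rule[0] in ref]
--         miss = [rule for rule in rules if rule[0] not in ref]
--         return [msg for _, msg in hit] + go(rest, miss)
--
--     return go(refs, _RULES)
-- ===== Notes on version B (the rewrite author's own statement) =====
-- stated objective: alternative
-- what changed: A appends possibly-duplicate messages risk by risk and removes duplicates with a final list(set(...)) pass; B stages the lowered references and then recursively partitions a shrinking rule list against each reference, so every rule fires at most once, no dedup step exists, and the recursion stops early once all rules (or references) are exhausted.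
import Mathlib
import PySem

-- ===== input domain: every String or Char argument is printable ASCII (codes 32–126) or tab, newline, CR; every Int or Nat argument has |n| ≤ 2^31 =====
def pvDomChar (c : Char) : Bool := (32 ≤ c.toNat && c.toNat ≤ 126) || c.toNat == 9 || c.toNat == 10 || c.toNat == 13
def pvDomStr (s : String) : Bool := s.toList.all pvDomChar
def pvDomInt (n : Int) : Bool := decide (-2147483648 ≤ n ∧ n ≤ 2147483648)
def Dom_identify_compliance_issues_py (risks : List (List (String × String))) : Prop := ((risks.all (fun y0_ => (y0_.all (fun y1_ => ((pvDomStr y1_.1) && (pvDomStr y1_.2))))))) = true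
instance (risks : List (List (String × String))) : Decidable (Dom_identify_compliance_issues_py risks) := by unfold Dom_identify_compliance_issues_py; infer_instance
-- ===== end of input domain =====

-- B stages the lowered references and recursively partitions a shrinking rule list against each
-- reference (each rule fires at most once, so A's final list(set(...)) dedup pass disappears);
-- objective: alternative decomposition, same cost.


-- ===== PORT A =====
-- risk['legal_reference'] is a first-match lookup; under Pre_ the key is present, so getD "" is exact.
-- Python's list(set(…)) order is hash-accidental; outputs are compared ignoring order, ported as PySem.Set.ofList.
def identify_compliance_issues_py (risks : List (List (String × String))) : List String :=
  PySem.Set.ofList (risks.foldl (fun compliance_issues risk =>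
    let compliance_issues :=
      if PySem.Str.isIn "consumer guarantees" (PySem.Str.lower ((PySem.Dict.mk risk).getD "legal_reference" "")) then
        compliance_issues ++ ["Australian Consumer Law compliance - consumer guarantees cannot be excluded"]
      else compliance_issues
    let compliance_issues :=
      if PySem.Str.isIn "unfair contract terms" (PySem.Str.lower ((PySem.Dict.mk risk).getD "legal_reference" "")) then
        compliance_issues ++ ["Unfair Contract Terms provisions may void certain clauses"]
      else compliance_issues
    let compliance_issues :=
      if PySem.Str.isIn "moral rights" (PySem.Str.lower ((PySem.Dict.mk risk).getD "legal_reference" "")) then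
        compliance_issues ++ ["Copyright Act compliance - moral rights cannot be assigned"]
      else compliance_issues
    compliance_issues) [])

-- ===== PORT B =====
def pvRules : List (String × String) :=
  [("consumer guarantees", "Australian Consumer Law compliance - consumer guarantees cannot be excluded"),
   ("unfair contract terms", "Unfair Contract Terms provisions may void certain clauses"),
   ("moral rights", "Copyright Act compliance - moral rights cannot be assigned")]

-- Source B's inner 'go': partition the remaining rules against the current reference, emit the hits,
-- recurse on the tail references with only the missed rules.
def pvGo (refs : List String) (rules : List (String × String)) : List String :=
  match refs with
  | [] => []
  | ref :: rest =>
    if rules.isEmpty then []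
    else
      let hit := rules.filter (fun rule => PySem.Str.isIn rule.1 ref)
      let miss := rules.filter (fun rule => !(PySem.Str.isIn rule.1 ref))
      hit.map (fun p => p.2) ++ pvGo rest miss

def identify_compliance_issues_py_alt (risks : List (List (String × String))) : List String :=
  let refs := risks.map (fun risk => PySem.Str.lower ((PySem.Dict.mk risk).getD "legal_reference" ""))
  pvGo refs pvRules

-- ===== PRECONDITION & SPEC =====
-- Pre_ excludes exactly the inputs where Python A raises KeyError: a risk dict without the key 'legal_reference'.
def Pre_identify_compliance_issues_py (risks : List (List (String × String))) : Prop :=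
  ∀ r ∈ risks, "legal_reference" ∈ r.map Prod.fst
instance (risks : List (List (String × String))) : Decidable (Pre_identify_compliance_issues_py risks) := by unfold Pre_identify_compliance_issues_py; infer_instance

def pvWitness_identify_compliance_issues_py : (List (List (String × String))) :=
  [[("legal_reference", "Consumer Guarantees s61")], [("legal_reference", "no issue")]]

def Spec_identify_compliance_issues_py (risks : List (List (String × String))) (out : List String) : Prop := out = identify_compliance_issues_py_alt risks
instance (risks : List (List (String × String))) (out : List String) : Decidable (Spec_identify_compliance_issues_py risks out) := by unfold Spec_identify_compliance_issues_py; infer_instance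

-- ===== CLAIM (what is proved, stated in full; the proofs are below) =====
def Claim_equal_identify_compliance_issues_py : Prop := ∀ (risks : List (List (String × String))), Dom_identify_compliance_issues_py risks → Pre_identify_compliance_issues_py risks → Spec_identify_compliance_issues_py risks (identify_compliance_issues_py risks)

-- ===== LEMMAS AND PROOFS =====

-- the messages one risk emits, in A's textual order (= pvRules order)
def pvEmit (risk : List (String × String)) : List String :=
  (if PySem.Str.isIn "consumer guarantees" (PySem.Str.lower ((PySem.Dict.mk risk).getD "legal_reference" "")) then
    ["Australian Consumer Law compliance - consumer guarantees cannot be excluded"] else []) ++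
  (if PySem.Str.isIn "unfair contract terms" (PySem.Str.lower ((PySem.Dict.mk risk).getD "legal_reference" "")) then
    ["Unfair Contract Terms provisions may void certain clauses"] else []) ++
  (if PySem.Str.isIn "moral rights" (PySem.Str.lower ((PySem.Dict.mk risk).getD "legal_reference" "")) then
    ["Copyright Act compliance - moral rights cannot be assigned"] else [])

theorem pvA_foldl (risks : List (List (String × String))) (l : List String) :
    risks.foldl (fun compliance_issues risk =>
      let compliance_issues :=
        if PySem.Str.isIn "consumer guarantees" (PySem.Str.lower ((PySem.Dict.mk risk).getD "legal_reference" "")) then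
          compliance_issues ++ ["Australian Consumer Law compliance - consumer guarantees cannot be excluded"]
        else compliance_issues
      let compliance_issues :=
        if PySem.Str.isIn "unfair contract terms" (PySem.Str.lower ((PySem.Dict.mk risk).getD "legal_reference" "")) then
          compliance_issues ++ ["Unfair Contract Terms provisions may void certain clauses"]
        else compliance_issues
      let compliance_issues :=
        if PySem.Str.isIn "moral rights" (PySem.Str.lower ((PySem.Dict.mk risk).getD "legal_reference" "")) then
          compliance_issues ++ ["Copyright Act compliance - moral rights cannot be assigned"]
        else compliance_issues
      compliance_issues) l = l ++ risks.flatMap pvEmit := by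
  induction risks generalizing l with
  | nil => simp
  | cons r rs ih =>
    simp only [List.foldl_cons, List.flatMap_cons, ih]
    unfold pvEmit
    split_ifs <;> simp

-- pvEmit is the rule-table filter of pvRules
theorem pvEmit_eq_filter (risk : List (String × String)) :
    pvEmit risk =
      (pvRules.filter (fun kv =>
        PySem.Str.isIn kv.1 (PySem.Str.lower ((PySem.Dict.mk risk).getD "legal_reference" "")))).map
        (fun p => p.2) := by
  unfold pvEmit pvRules
  simp only [List.filter_cons, List.filter_nil]
  split_ifs <;> simp_all

-- set(xs) commutes with filter
theorem pv_ofList_filter {α : Type} [BEq α] [LawfulBEq α] (l : List α) (q : α → Bool) :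
    PySem.Set.ofList (l.filter q) = (PySem.Set.ofList l).filter q := by
  induction l using List.reverseRecOn with
  | nil => simp
  | append_singleton l x ih =>
    rw [List.filter_append]
    by_cases hq : q x = true
    · simp only [List.filter_cons, hq, if_pos, List.filter_nil]
      rw [PySem.Set.ofList_append_singleton, PySem.Set.ofList_append_singleton,
        PySem.Set.add_eq_ite, PySem.Set.add_eq_ite]
      by_cases hx : x ∈ l
      · have h1 : x ∈ PySem.Set.ofList (l.filter q) := by
          rw [PySem.Set.mem_ofList]; exact List.mem_filter.mpr ⟨hx, hq⟩
        have h2 : x ∈ PySem.Set.ofList l := by rw [PySem.Set.mem_ofList]; exact hx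
        simp [h2, ih, hq]
      · have h1 : x ∉ PySem.Set.ofList (l.filter q) := by
          rw [PySem.Set.mem_ofList]; intro h; exact hx (List.mem_filter.mp h).1
        have h2 : x ∉ PySem.Set.ofList l := by rw [PySem.Set.mem_ofList]; exact hx
        simp [h2, ih, List.filter_append, hq]
    · have hq' : q x = false := by simpa using hq
      simp only [List.filter_cons, hq', List.filter_nil]
      rw [PySem.Set.ofList_append_singleton, PySem.Set.add_eq_ite]
      by_cases hx : x ∈ PySem.Set.ofList l
      · simp [hx, ih]
      · simp [hx, ih, List.filter_append, hq']

-- filtered-then-mapped snds of a snd-nodup rule list are nodup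
theorem pv_snd_nodup_filter (rules : List (String × String)) (p : String × String → Bool)
    (h : (rules.map Prod.snd).Nodup) : ((rules.filter p).map Prod.snd).Nodup :=
  h.sublist ((rules.filter_sublist (p := p)).map Prod.snd)

-- the partition recursion computes first-occurrence dedup of the rule-table emission stream
theorem pv_go_eq (refs : List String) (rules : List (String × String))
    (h : (rules.map Prod.snd).Nodup) :
    pvGo refs rules =
      PySem.Set.ofList (refs.flatMap (fun ref =>
        (rules.filter (fun kv => PySem.Str.isIn kv.1 ref)).map (fun p => p.2))) := by
  induction refs generalizing rules with
  | nil => simp [pvGo]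
  | cons ref rest ih =>
    by_cases hr : rules = []
    · subst hr
      have hx : List.flatMap (fun _ : String => ([] : List String)) rest = [] :=
        List.flatMap_eq_nil_iff.mpr (by intros; rfl)
      simp only [List.filter_nil, List.map_nil, List.flatMap_cons, List.nil_append, hx, pvGo]
      rfl
    · have hne : rules.isEmpty = false := by simpa [List.isEmpty_iff] using hr
      rw [List.flatMap_cons, PySem.Set.ofList_append, PySem.Set.update_eq_append_filter]
      have hnodupE : ((rules.filter (fun kv => PySem.Str.isIn kv.1 ref)).map (fun p => p.2)).Nodup :=
        pv_snd_nodup_filter rules _ h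
      rw [PySem.Set.ofList_eq_self_of_nodup _ hnodupE]
      simp only [pvGo, hne, Bool.false_eq_true, if_false]
      congr 1
      set e := (rules.filter (fun kv => PySem.Str.isIn kv.1 ref)).map (fun p => p.2) with he
      have hcontains : ∀ kv ∈ rules,
          (PySem.Set.contains e kv.2) = PySem.Str.isIn kv.1 ref := by
        intro kv hkv
        by_cases hp : PySem.Str.isIn kv.1 ref = true
        · rw [hp]
          exact (PySem.Set.contains_iff e kv.2).2
            (by rw [he]; exact List.mem_map.mpr ⟨kv, List.mem_filter.mpr ⟨hkv, hp⟩, rfl⟩)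
        · have hp' : PySem.Str.isIn kv.1 ref = false := by simpa using hp
          rw [hp']
          by_contra hc
          have hc' : PySem.Set.contains e kv.2 = true := by
            cases hb : PySem.Set.contains e kv.2 with
            | false => exact absurd hb hc
            | true => rfl
          have hmem := (PySem.Set.contains_iff e kv.2).1 hc'
          rw [he] at hmem
          obtain ⟨kv', hkv', hsnd⟩ := List.mem_map.mp hmem
          have hkv'r := List.mem_filter.mp hkv'
          have : kv' = kv := List.inj_on_of_nodup_map h hkv'r.1 hkv hsnd
          rw [this] at hkv'r
          exact hp hkv'r.2
      rw [← pv_ofList_filter, ih _ (pv_snd_nodup_filter rules _ h), List.filter_flatMap]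
      refine congrArg PySem.Set.ofList (congrArg (fun f => List.flatMap f rest) (funext fun ref' => ?_))
      rw [List.filter_map, List.filter_filter, List.filter_filter]
      congr 1
      apply List.filter_congr
      intro kv hkv
      simp only [Function.comp]
      rw [hcontains kv hkv]
      cases PySem.Str.isIn kv.1 ref' <;> cases hh : PySem.Str.isIn kv.1 ref <;> simp

-- ===== VERDICT (by name: the statement is the Claim_ definition above) =====
theorem identify_compliance_issues_py_spec : Claim_equal_identify_compliance_issues_py := by
  intro risks _ _
  unfold Spec_identify_compliance_issues_py identify_compliance_issues_py identify_compliance_issues_py_alt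
  rw [pvA_foldl]
  rw [pv_go_eq _ _ (by decide)]
  rw [List.flatMap_map]
  simp only [List.nil_append]
  congr 1
  apply List.flatMap_congr
  intro r _
  exact pvEmit_eq_filter r
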